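-- pv_equiv track=rewrite | github.com/muzhi-zn/Mask_DP_git | query_system/service/create_jb_file_service.py | get_db_ly
-- ===== SOURCE A (Python) =====
-- def get_db_ly(l_list):
--     """获取boolean_info中带DB的layer数据"""
--     ly_list = []
--     d = {}
--     for l in l_list:
--         f = l.split(';')[0]
--         e = l.split(';')[1]
--         if f in d.keys():
--             d[f] = d[f] + ", " + e
--         else:
--             d[f] = l
--     for v in d.values():
--         ly_list.append("{%s}" % v)
--     return ly_list
-- ===== SOURCE B (Python) =====
-- def get_db_ly(l_list):
--     """获取boolean_info中带DB的layer数据 — two passes: group lines by first field (splitting each line once), then format each group."""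
--     groups = {}
--     for l in l_list:
--         fields = l.split(';')
--         groups.setdefault(fields[0], []).append((l, fields[1]))
--     ly_list = []
--     for g in groups.values():
--         s = g[0][0]
--         for _, e in g[1:]:
--             s = s + ", " + e
--         ly_list.append("{" + s + "}")
--     return ly_list
-- ===== Notes on version B (the rewrite author's own statement) =====
-- stated objective: alternative
-- what changed: B separates grouping from formatting: one pass splits each line once and groups (line, second-field) pairs by first field into an ordered dict of lists, a second pass formats each group (first line verbatim, later lines' stored second fields appended), instead of A's single loop that re-splits every line twice and interleaves lookup-and-concatenate on string values.
import Mathlib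
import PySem

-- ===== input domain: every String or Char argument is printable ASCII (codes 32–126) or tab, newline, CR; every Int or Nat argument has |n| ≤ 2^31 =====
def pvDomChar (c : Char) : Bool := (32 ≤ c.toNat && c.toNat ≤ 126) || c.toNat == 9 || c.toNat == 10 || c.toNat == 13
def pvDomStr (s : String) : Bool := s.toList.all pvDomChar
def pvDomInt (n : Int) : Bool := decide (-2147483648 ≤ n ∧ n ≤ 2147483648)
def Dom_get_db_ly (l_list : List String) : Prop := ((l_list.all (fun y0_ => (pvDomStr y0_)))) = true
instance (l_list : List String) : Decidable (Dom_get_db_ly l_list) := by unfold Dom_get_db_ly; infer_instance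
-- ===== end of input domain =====

-- B regroups the work into two passes (group (line, second-field) pairs by first field, splitting each
-- line once; then format each group); equal return value on Pre_ below, where A returns.

-- s.split(';')  (split? is none only for sep = ""; the separator here is ";")
def pvSplit (l : String) : List String := (PySem.Str.split? l ";").getD []
-- l.split(';')[0]  (always exists: split is never empty)
def pvKey (l : String) : String := (PySem.List.pyGet? (pvSplit l) 0).getD ""
-- "{%s}" % v  resp.  "{" + s + "}";  string + is PySem.Str.join "" (String.append is kernel-opaque)
def pvWrap (v : String) : String := PySem.Str.join "" ["{", v, "}"]

-- ===== PORT A =====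
-- the first loop of A, threading the dict; none = the IndexError of l.split(';')[1]
def get_db_ly_go (l_list : List String) (d : PySem.Dict String String) :
    Option (PySem.Dict String String) :=
  match l_list with
  | [] => some d
  | l :: rest =>
    match PySem.List.pyGet? (pvSplit l) 1 with
    | none => none
    | some e =>
      if (d.contains (pvKey l)) = true then
        get_db_ly_go rest (d.insert (pvKey l) (PySem.Str.join "" [d.getD (pvKey l) "", ", ", e]))
      else
        get_db_ly_go rest (d.insert (pvKey l) l)

def get_db_ly (l_list : List String) : List String :=
  match get_db_ly_go l_list PySem.Dict.empty with
  | some d => d.values.map pvWrap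
  | none => []

-- ===== PORT B =====
-- B's grouping loop: groups.setdefault(fields[0], []).append((l, fields[1])); none = the IndexError of fields[1]
def get_db_ly_alt_go (l_list : List String)
    (groups : PySem.Dict String (List (String × String))) :
    Option (PySem.Dict String (List (String × String))) :=
  match l_list with
  | [] => some groups
  | l :: rest =>
    match PySem.List.pyGet? (pvSplit l) 1 with
    | none => none
    | some e => get_db_ly_alt_go rest (groups.modify (pvKey l) [] (· ++ [(l, e)]))

-- B's formatting loop: s = g[0][0]; for _, e in g[1:]: s += ", " + e   ([] never occurs: groups are nonempty)
def fmtGroup (g : List (String × String)) : String :=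
  match g with
  | [] => ""
  | h :: t => t.foldl (fun acc p => PySem.Str.join "" [acc, ", ", p.2]) h.1

def get_db_ly_alt (l_list : List String) : List String :=
  match get_db_ly_alt_go l_list PySem.Dict.empty with
  | some groups => groups.values.map (fun g => pvWrap (fmtGroup g))
  | none => []

-- ===== PRECONDITION & SPEC =====
-- Pre_ excludes exactly the inputs where A raises IndexError: a line with no ';' (split yields < 2 fields).
def Pre_get_db_ly (l_list : List String) : Prop :=
  ∀ l ∈ l_list, 2 ≤ (pvSplit l).length
instance (l_list : List String) : Decidable (Pre_get_db_ly l_list) := by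
  unfold Pre_get_db_ly; infer_instance
def pvWitness_get_db_ly : List String := ["a;1;z", "b;2", "a;3;w", "b;4"]

def Spec_get_db_ly (l_list : List String) (out : List String) : Prop := out = get_db_ly_alt l_list
instance (l_list : List String) (out : List String) : Decidable (Spec_get_db_ly l_list out) := by
  unfold Spec_get_db_ly; infer_instance

-- ===== CLAIM (what is proved, stated in full; the proofs are below) =====
def Claim_equal_get_db_ly : Prop := ∀ (l_list : List String), Dom_get_db_ly l_list →
  Pre_get_db_ly l_list → Spec_get_db_ly l_list (get_db_ly l_list)

-- ===== LEMMAS AND PROOFS =====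

-- PySem.Dict.modify is insert of the modified value (items are equal definitionally)
lemma modify_as_insert {κ ν : Type} [BEq κ] [LawfulBEq κ] (d : PySem.Dict κ ν) (k : κ) (d0 : ν)
    (f : ν → ν) : d.modify k d0 f = d.insert k (f (d.getD k d0)) := PySem.Dict.ext_iff.mpr rfl

-- the invariant tying A's dict of strings to B's dict of (line, second-field) groups
def pvInv (dA : PySem.Dict String String) (dB : PySem.Dict String (List (String × String))) : Prop :=
  dA.keys = dB.keys ∧ dB.keys.Nodup ∧
  ∀ k, dA.get? k = (dB.get? k).map fmtGroup ∧ dB.get? k ≠ some []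

lemma main_inv (l_list : List String) :
    ∀ (dA : PySem.Dict String String) (dB : PySem.Dict String (List (String × String))),
      Pre_get_db_ly l_list → pvInv dA dB →
      ∃ dA' dB', get_db_ly_go l_list dA = some dA' ∧
        get_db_ly_alt_go l_list dB = some dB' ∧ pvInv dA' dB' := by
  induction l_list with
  | nil => intro dA dB _ h; exact ⟨dA, dB, rfl, rfl, h⟩
  | cons l rest ih =>
    intro dA dB hPre hInv
    obtain ⟨hkeys, hnd, hget⟩ := hInv
    have hl : 2 ≤ (pvSplit l).length := hPre l (by simp)
    have he : PySem.List.pyGet? (pvSplit l) 1 = some (pvSplit l)[1] := by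
      have h1 : 1 < (pvSplit l).length := by omega
      simp only [pysem]
      exact List.getElem?_eq_getElem h1
    have hPre' : Pre_get_db_ly rest := fun x hx => hPre x (by simp [hx])
    simp only [get_db_ly_go, get_db_ly_alt_go, he]
    rw [modify_as_insert]
    by_cases hc : dA.contains (pvKey l) = true
    · -- key already present: A concatenates ", " + e; B appends the pair to the group
      rw [if_pos hc]
      obtain ⟨v, hv⟩ : ∃ v, dA.get? (pvKey l) = some v := by
        cases h : dA.get? (pvKey l) with
        | none => rw [PySem.Dict.get?_eq_none_iff_contains] at h; rw [hc] at h; exact absurd h (by simp)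
        | some v => exact ⟨v, rfl⟩
      obtain ⟨g, hg⟩ : ∃ g, dB.get? (pvKey l) = some g := by
        cases h : dB.get? (pvKey l) with
        | none =>
          have h2 := (hget (pvKey l)).1; rw [hv, h] at h2; exact absurd h2 (by simp)
        | some g => exact ⟨g, rfl⟩
      have hfmt : fmtGroup g = v := by
        have := (hget (pvKey l)).1; rw [hv, hg] at this
        simpa using this.symm
      obtain ⟨h0, t0, rfl⟩ : ∃ h0 t0, g = h0 :: t0 := by
        cases g with
        | nil => exact absurd hg (hget (pvKey l)).2
        | cons h0 t0 => exact ⟨h0, t0, rfl⟩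
      have hgetDA : dA.getD (pvKey l) "" = v := PySem.Dict.getD_of_get?_eq_some dA "" hv
      have hgetDB : dB.getD (pvKey l) [] = h0 :: t0 := PySem.Dict.getD_of_get?_eq_some dB [] hg
      have hcB' : dB.contains (pvKey l) = true := by
        rw [PySem.Dict.contains_iff_mem_keys, ← hkeys]
        exact (PySem.Dict.contains_iff_mem_keys dA (pvKey l)).mp hc
      have hfmt' : fmtGroup (h0 :: t0 ++ [(l, (pvSplit l)[1])]) =
          PySem.Str.join "" [dA.getD (pvKey l) "", ", ", (pvSplit l)[1]] := by
        show (t0 ++ [(l, (pvSplit l)[1])]).foldl _ h0.1 = _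
        rw [List.foldl_append, show t0.foldl _ h0.1 = v from hfmt, hgetDA]
        rfl
      apply ih _ _ hPre'
      refine ⟨?_, ?_, ?_⟩
      · rw [PySem.Dict.keys_insert_of_contains _ _ hc, hgetDB,
          PySem.Dict.keys_insert_of_contains _ _ hcB', hkeys]
      · rwa [hgetDB, PySem.Dict.keys_insert_of_contains _ _ hcB']
      · intro k
        by_cases hk : k = pvKey l
        · subst hk
          rw [PySem.Dict.get?_insert_self, hgetDB, PySem.Dict.get?_insert_self]
          exact ⟨by rw [Option.map_some, hfmt'], by simp⟩
        · rw [PySem.Dict.get?_insert_of_ne _ _ hk, hgetDB, PySem.Dict.get?_insert_of_ne _ _ hk]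
          exact hget k
    · -- fresh key: A stores the whole line; B starts the group [(l, e)]
      rw [if_neg hc]
      have hcA : dA.get? (pvKey l) = none := by
        rw [PySem.Dict.get?_eq_none_iff_contains]; simpa using hc
      have hcB : dB.get? (pvKey l) = none := by
        rw [PySem.Dict.get?_eq_none_iff_not_mem_keys, ← hkeys]
        rw [PySem.Dict.get?_eq_none_iff_not_mem_keys] at hcA; exact hcA
      have hcB' : dB.contains (pvKey l) = false := by
        rwa [← PySem.Dict.get?_eq_none_iff_contains]
      have hgetDB : dB.getD (pvKey l) [] = [] := PySem.Dict.getD_of_not_contains dB [] hcB'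
      apply ih _ _ hPre'
      refine ⟨?_, ?_, ?_⟩
      · rw [PySem.Dict.keys_insert_of_not_contains _ _ (by simpa using hc),
          PySem.Dict.keys_insert_of_not_contains _ _ hcB', hkeys]
      · rw [PySem.Dict.keys_insert_of_not_contains _ _ hcB']
        have hnm : pvKey l ∉ dB.keys :=
          (PySem.Dict.get?_eq_none_iff_not_mem_keys dB (pvKey l)).mp hcB
        simp only [List.nodup_append, List.nodup_singleton, true_and, hnd]
        intro a ha b hb
        simp only [List.mem_singleton] at hb
        exact fun h => hnm (hb ▸ h ▸ ha)
      · intro k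
        by_cases hk : k = pvKey l
        · subst hk
          rw [PySem.Dict.get?_insert_self, hgetDB, PySem.Dict.get?_insert_self]
          exact ⟨rfl, by simp⟩
        · rw [PySem.Dict.get?_insert_of_ne _ _ hk, hgetDB, PySem.Dict.get?_insert_of_ne _ _ hk]
          exact hget k

-- ===== VERDICT (by name: the statement is the Claim_ definition above) =====
theorem get_db_ly_spec : Claim_equal_get_db_ly := by
  intro l_list _ hPre
  unfold Spec_get_db_ly get_db_ly get_db_ly_alt
  obtain ⟨dA', dB', hgoA, hgoB, hkeys, hnd, hget⟩ :=
    main_inv l_list PySem.Dict.empty PySem.Dict.empty hPre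
      ⟨rfl, by decide, fun k => by simp [PySem.Dict.get?_empty]⟩
  rw [hgoA, hgoB]
  show List.map pvWrap dA'.values = List.map (fun g => pvWrap (fmtGroup g)) dB'.values
  rw [PySem.Dict.values_eq_map_keys dB' hnd [],
      PySem.Dict.values_eq_map_keys dA' (hkeys ▸ hnd) "", hkeys,
      List.map_map, List.map_map]
  apply List.map_congr_left
  intro k hk
  obtain ⟨g, hg⟩ : ∃ g, dB'.get? k = some g := by
    cases h : dB'.get? k with
    | none => exact absurd ((PySem.Dict.get?_eq_none_iff_not_mem_keys dB' k).mp h) (by simp [hk])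
    | some g => exact ⟨g, rfl⟩
  have hv : dA'.get? k = some (fmtGroup g) := by rw [(hget k).1, hg]; rfl
  simp only [Function.comp_apply, PySem.Dict.getD_of_get?_eq_some dB' [] hg,
    PySem.Dict.getD_of_get?_eq_some dA' "" hv]
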